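-- pv_equiv track=rewrite | github.com/chloeeekim/TIL | Algorithm/Programmers/Codes/67257.py | solution
-- ===== SOURCE A (Python) =====
-- from itertools import permutations
--
-- def solution(expression):
--     numbers, ops = [], []
--     temp = 0
--     for ch in expression:
--         if ch.isdigit():
--             temp = temp * 10 + int(ch)
--         else:
--             numbers.append(temp)
--             temp = 0
--             ops.append(ch)
--     numbers.append(temp)
--
--     def calc(tnums, tops, orders):
--         for op in orders:
--             while op in tops:
--                 idx = tops.index(op)
--                 if op == "*":
--                     calc = tnums[idx] * tnums[idx + 1]
--                 elif op == "+":
--                     calc = tnums[idx] + tnums[idx + 1]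
--                 else:
--                     calc = tnums[idx] - tnums[idx + 1]
--                 tnums[idx] = calc
--                 tnums.pop(idx + 1)
--                 tops.pop(idx)
--         return tnums[0]
--
--     perm = permutations(["*", "+", "-"], 3)
--     res = []
--     for p in perm:
--         res.append(calc(numbers[:], ops[:], p))
--     return max(abs(r) for r in res)
-- ===== SOURCE B (Python) =====
-- def solution(expression):
--     nums, ops = [], []
--     t = 0
--     for ch in expression:
--         if ch.isdigit():
--             t = t * 10 + int(ch)
--         else:
--             nums.append(t)
--             t = 0
--             ops.append(ch)
--     nums.append(t)
--
--     best = 0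
--     for order in (("*", "+", "-"), ("*", "-", "+"), ("+", "*", "-"),
--                   ("+", "-", "*"), ("-", "*", "+"), ("-", "+", "*")):
--         ns, os_ = nums, ops
--         for op in order:
--             stack = [ns[0]]
--             rops = []
--             for o, n in zip(os_, ns[1:]):
--                 if o == op:
--                     a = stack[-1]
--                     stack[-1] = a * n if op == "*" else a + n if op == "+" else a - n
--                 else:
--                     stack.append(n)
--                     rops.append(o)
--             ns, os_ = stack, rops
--         v = ns[0] if ns[0] >= 0 else -ns[0]
--         if v > best:
--             best = v
--     return best
-- ===== Notes on version B (the rewrite author's own statement) =====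
-- stated objective: alternative
-- what changed: Each operator-precedence ordering is evaluated by a single left-to-right stack pass per operator with a running max of absolute values, instead of A's repeated list.index/pop reductions that rescan and shift the lists for every single operation.
import Mathlib
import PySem

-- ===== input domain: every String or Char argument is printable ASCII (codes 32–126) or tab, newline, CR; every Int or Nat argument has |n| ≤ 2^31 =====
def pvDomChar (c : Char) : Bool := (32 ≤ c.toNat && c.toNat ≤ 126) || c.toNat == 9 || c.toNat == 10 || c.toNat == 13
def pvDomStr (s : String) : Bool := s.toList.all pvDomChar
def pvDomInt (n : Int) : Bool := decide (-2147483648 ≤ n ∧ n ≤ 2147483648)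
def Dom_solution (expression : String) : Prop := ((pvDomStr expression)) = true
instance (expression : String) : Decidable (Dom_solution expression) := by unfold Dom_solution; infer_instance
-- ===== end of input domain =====

-- B replaces A's repeated index/pop reductions with one left-to-right stack pass per
-- operator and a running max of absolute values (alternative algorithm, same result).

-- ===== PORT A =====
-- shared shape of the */+/- branch chain (both Pythons have the identical if/elif/else)
def pvApply (op : Char) (a n : Int) : Int :=
  if op = '*' then a * n else if op = '+' then a + n else a - n

-- tokenizer: for ch in expression: if ch.isdigit(): temp = temp*10+int(ch) else append
def pvTokStep (st : (List Int × List Char) × Int) (ch : Char) : (List Int × List Char) × Int :=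
  if PySem.Chars.isdigit ch then (st.1, st.2 * 10 + (PySem.Int.ofChars? [ch]).getD 0)
  else ((st.1.1 ++ [st.2], st.1.2 ++ [ch]), 0)

def pvTokA (e : String) : List Int × List Char :=
  let st := e.toList.foldl pvTokStep (([], []), 0)
  (st.1.1 ++ [st.2], st.1.2)

-- A's inner while loop: `while op in tops: idx = tops.index(op); …; tnums.pop(idx+1); tops.pop(idx)`
-- (pop's return values are unused, so the pops appear as eraseIdx; idx is in range by index?)
def pvCalcWhile (op : Char) (tnums : List Int) (tops : List Char) : List Int × List Char :=
  match h : PySem.List.index? tops op with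
  | none => (tnums, tops)
  | some idx =>
      let c := pvApply op (PySem.List.pyGetD tnums (idx : Int) 0)
                         (PySem.List.pyGetD tnums ((idx : Int) + 1) 0)
      pvCalcWhile op ((tnums.set idx c).eraseIdx (idx + 1)) (tops.eraseIdx idx)
termination_by tops.length
decreasing_by
  obtain ⟨hk, -, -⟩ := PySem.List.getElem_of_index?_eq_some h
  simp [List.length_eraseIdx, hk]
  omega

def pvCalc (tnums : List Int) (tops : List Char) (orders : List Char) : Int :=
  let st := orders.foldl (fun st op => pvCalcWhile op st.1 st.2) (tnums, tops)
  PySem.List.pyGetD st.1 0 0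

def solution (expression : String) : Int :=
  let t := pvTokA expression
  let perm := PySem.List.permutations ['*', '+', '-'] 3
  let res := perm.foldl (fun acc p => acc ++ [pvCalc t.1 t.2 p]) []
  (PySem.List.max? (res.map (fun r => |r|)) (fun x => x)).getD 0

-- ===== PORT B =====
def pvTokB (e : String) : List Int × List Char :=
  let st := e.toList.foldl pvTokStep (([], []), 0)
  (st.1.1 ++ [st.2], st.1.2)

-- one step of B's stack pass; the Python stack appends at the end, the port keeps it
-- head-first (stack[-1] = head), reversing once at the end of the pass
def pvStep (op : Char) (st : List Int × List Char) (on : Char × Int) : List Int × List Char :=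
  if on.1 = op then (pvApply op (st.1.headD 0) on.2 :: st.1.tail, st.2)
  else (on.2 :: st.1, on.1 :: st.2)

-- `for o, n in zip(os_, ns[1:]): …`
def pvPass (op : Char) (ns : List Int) (os : List Char) : List Int × List Char :=
  let st := (os.zip (ns.drop 1)).foldl (pvStep op) ([PySem.List.pyGetD ns 0 0], [])
  (st.1.reverse, st.2.reverse)

def pvOrders : List (List Char) :=
  [['*','+','-'], ['*','-','+'], ['+','*','-'], ['+','-','*'], ['-','*','+'], ['-','+','*']]

def solution_alt (expression : String) : Int :=
  let t := pvTokB expression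
  pvOrders.foldl (fun best ord =>
    let st := ord.foldl (fun st op => pvPass op st.1 st.2) (t.1, t.2)
    let x := PySem.List.pyGetD st.1 0 0
    let v := if x ≥ 0 then x else -x
    if v > best then v else best) 0

-- ===== PRECONDITION & SPEC =====
def Spec_solution (expression : String) (out : Int) : Prop := out = solution_alt expression
instance (expression : String) (out : Int) : Decidable (Spec_solution expression out) := by unfold Spec_solution; infer_instance

-- ===== CLAIM (what is proved, stated in full; the proofs are below) =====
def Claim_equal_solution : Prop := ∀ (expression : String), Dom_solution expression → Spec_solution expression (solution expression)

-- ===== LEMMAS AND PROOFS =====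

-- clean recursive description of "reduce every occurrence of op left to right";
-- `a` is the value accumulated to the left, os/ns the remaining operator/operand pairs
def pvRed (op : Char) (a : Int) : List Char → List Int → List Int × List Char
  | [], _ => ([a], [])
  | _ :: _, [] => ([a], [])
  | o :: os, n :: ns =>
      if o = op then pvRed op (pvApply op a n) os ns
      else ((a :: (pvRed op n os ns).1), o :: (pvRed op n os ns).2)

lemma pvRed_len (op : Char) : ∀ (os : List Char) (ns : List Int) (a : Int),
    os.length = ns.length →
    (pvRed op a os ns).1.length = (pvRed op a os ns).2.length + 1 := by
  intro os
  induction os with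
  | nil => intro ns a h; simp [pvRed]
  | cons o os ih =>
    intro ns a h
    cases ns with
    | nil => simp at h
    | cons n ns =>
      simp at h
      by_cases hop : o = op <;> simp [pvRed, hop, ih ns _ h]

lemma pvCalcWhile_none (op : Char) (tnums : List Int) (tops : List Char)
    (h : PySem.List.index? tops op = none) :
    pvCalcWhile op tnums tops = (tnums, tops) := by
  rw [pvCalcWhile]
  split
  · rfl
  · rename_i idx heq
    rw [h] at heq
    exact absurd heq (by simp)

lemma pvCalcWhile_some (op : Char) (tnums : List Int) (tops : List Char) (idx : Nat)
    (h : PySem.List.index? tops op = some idx) :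
    pvCalcWhile op tnums tops =
      pvCalcWhile op
        ((tnums.set idx (pvApply op (PySem.List.pyGetD tnums (idx : Int) 0)
            (PySem.List.pyGetD tnums ((idx : Int) + 1) 0))).eraseIdx (idx + 1))
        (tops.eraseIdx idx) := by
  conv_lhs => rw [pvCalcWhile]
  split
  · rename_i heq
    rw [h] at heq
    exact absurd heq (by simp)
  · rename_i idx' heq
    rw [h] at heq
    cases heq
    rfl

lemma pyGetD_cast (xs : List Int) (i : Nat) :
    PySem.List.pyGetD xs (i : Int) 0 = xs.getD i 0 := by
  simp [List.getD]

lemma pyGetD_cast_succ (xs : List Int) (i : Nat) :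
    PySem.List.pyGetD xs ((i : Int) + 1) 0 = xs.getD (i + 1) 0 := by
  have : ((i : Int) + 1) = ((i + 1 : Nat) : Int) := by push_cast; ring
  rw [this, PySem.List.pyGetD_natCast]

lemma pvCalcWhile_cons_ne (op o : Char) (hne : ¬ o = op) :
    ∀ (k : Nat) (os : List Char) (ns : List Int) (a : Int),
    os.length ≤ k → ns.length = os.length + 1 →
    pvCalcWhile op (a :: ns) (o :: os) =
      ((pvCalcWhile op ns os).1 |> (a :: ·), o :: (pvCalcWhile op ns os).2) := by
  intro k
  induction k with
  | zero =>
    intro os ns a hk hl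
    have hos : os = [] := by cases os <;> simp_all
    subst hos
    have h1 : PySem.List.index? ([o] : List Char) op = none := by
      rw [PySem.List.index?_cons_of_ne [] hne]; rfl
    rw [pvCalcWhile_none op _ _ h1, pvCalcWhile_none op _ _ rfl]
  | succ k ih =>
    intro os ns a hk hl
    cases hidx : PySem.List.index? os op with
    | none =>
      have h1 : PySem.List.index? (o :: os) op = none := by
        rw [PySem.List.index?_cons_of_ne os hne, hidx]; rfl
      rw [pvCalcWhile_none op _ _ h1, pvCalcWhile_none op _ _ hidx]
    | some idx =>
      obtain ⟨hlt, -, -⟩ := PySem.List.getElem_of_index?_eq_some hidx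
      have h1 : PySem.List.index? (o :: os) op = some (idx + 1) := by
        rw [PySem.List.index?_cons_of_ne os hne, hidx]; rfl
      rw [pvCalcWhile_some op _ _ _ h1, pvCalcWhile_some op _ _ _ hidx]
      rw [pyGetD_cast, pyGetD_cast_succ, pyGetD_cast, pyGetD_cast_succ]
      have hset : (a :: ns).set (idx + 1)
          (pvApply op ((a :: ns).getD (idx + 1) 0) ((a :: ns).getD (idx + 1 + 1) 0)) =
          a :: ns.set idx (pvApply op (ns.getD idx 0) (ns.getD (idx + 1) 0)) := by
        simp
      rw [hset]
      rw [show (idx + 1 + 1) = (idx + 1) + 1 from rfl, List.eraseIdx_cons_succ,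
          List.eraseIdx_cons_succ]
      exact ih (os.eraseIdx idx) _ a
        (by rw [List.length_eraseIdx_of_lt hlt]; omega)
        (by rw [List.length_eraseIdx_of_lt hlt,
                List.length_eraseIdx_of_lt (by simp; omega), List.length_set]; omega)

lemma pvCalcWhile_eq_red (op : Char) : ∀ (os : List Char) (ns : List Int) (a : Int),
    os.length = ns.length →
    pvCalcWhile op (a :: ns) os = pvRed op a os ns := by
  intro os
  induction os with
  | nil =>
    intro ns a h
    cases ns with
    | nil => rw [pvCalcWhile_none op _ _ rfl]; rfl
    | cons n ns => simp at h
  | cons o os ih =>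
    intro ns a h
    cases ns with
    | nil => simp at h
    | cons n ns =>
      simp at h
      by_cases hop : o = op
      · subst hop
        rw [pvCalcWhile_some _ _ _ 0 (PySem.List.index?_cons_self o _)]
        rw [pyGetD_cast, pyGetD_cast_succ]
        simp only [List.getD_cons_zero, List.getD_cons_succ, List.set_cons_zero,
          List.eraseIdx_cons_succ, List.eraseIdx_zero, List.tail_cons]
        rw [ih ns (pvApply o a n) h]
        simp [pvRed]
      · rw [pvCalcWhile_cons_ne op o hop os.length os (n :: ns) a le_rfl (by simp; omega)]
        rw [ih ns n h]
        simp [pvRed, hop]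

lemma pvPass_go (op : Char) : ∀ (os : List Char) (ns : List Int) (a : Int)
    (sacc : List Int) (oacc : List Char), os.length = ns.length →
    (os.zip ns).foldl (pvStep op) (a :: sacc, oacc) =
      ((pvRed op a os ns).1.reverse ++ sacc, (pvRed op a os ns).2.reverse ++ oacc) := by
  intro os
  induction os with
  | nil =>
    intro ns a sacc oacc h
    simp [pvRed]
  | cons o os ih =>
    intro ns a sacc oacc h
    cases ns with
    | nil => simp at h
    | cons n ns =>
      simp at h
      by_cases hop : o = op
      · simp [pvStep, hop, pvRed, ih ns (pvApply op a n) sacc oacc h]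
      · simp [pvStep, hop, pvRed, ih ns n (a :: sacc) (o :: oacc) h]

lemma pvPass_eq_red (op : Char) (a : Int) (ns : List Int) (os : List Char)
    (h : os.length = ns.length) :
    pvPass op (a :: ns) os = pvRed op a os ns := by
  simp [pvPass, pvPass_go op os ns a [] [] h]

lemma pvWhile_eq_pass (op : Char) (ns : List Int) (os : List Char)
    (h : ns.length = os.length + 1) :
    pvCalcWhile op ns os = pvPass op ns os := by
  cases ns with
  | nil => simp at h
  | cons a ns =>
    simp at h
    rw [pvCalcWhile_eq_red op os ns a h.symm, pvPass_eq_red op a ns os h.symm]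

lemma pvWhile_len (op : Char) (ns : List Int) (os : List Char)
    (h : ns.length = os.length + 1) :
    (pvCalcWhile op ns os).1.length = (pvCalcWhile op ns os).2.length + 1 := by
  cases ns with
  | nil => simp at h
  | cons a ns =>
    simp at h
    rw [pvCalcWhile_eq_red op os ns a h.symm]
    exact pvRed_len op os ns a h.symm

lemma pvFold_eq (ord : List Char) : ∀ (st : List Int × List Char),
    st.1.length = st.2.length + 1 →
    ord.foldl (fun st op => pvCalcWhile op st.1 st.2) st =
      ord.foldl (fun st op => pvPass op st.1 st.2) st := by
  induction ord with
  | nil => intro st h; rfl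
  | cons op ord ih =>
    intro st h
    simp only [List.foldl_cons]
    rw [← pvWhile_eq_pass op st.1 st.2 h]
    exact ih _ (pvWhile_len op st.1 st.2 h)

lemma pvTokStep_len : ∀ (cs : List Char) (st : (List Int × List Char) × Int),
    st.1.1.length = st.1.2.length →
    (cs.foldl pvTokStep st).1.1.length = (cs.foldl pvTokStep st).1.2.length := by
  intro cs
  induction cs with
  | nil => intro st h; simpa
  | cons c cs ih =>
    intro st h
    by_cases hd : PySem.Chars.isdigit c
    · simpa [pvTokStep, hd] using ih _ (by simpa [pvTokStep, hd])
    · simpa [pvTokStep, hd] using ih _ (by simp [h])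

lemma pvTok_len (e : String) : (pvTokA e).1.length = (pvTokA e).2.length + 1 := by
  have := pvTokStep_len e.toList (([], []), 0) rfl
  simp [pvTokA, this]

lemma pv_max_zero_abs (x : Int) : max 0 |x| = |x| := max_eq_right (abs_nonneg x)

lemma pv_if_gt_max (b v : Int) : (if v > b then v else b) = max b v := by
  rw [max_def]; split_ifs <;> omega

lemma pv_if_abs (x : Int) : (if x ≥ 0 then x else -x) = |x| := by
  by_cases h : 0 ≤ x
  · rw [if_pos h, abs_of_nonneg h]
  · rw [if_neg h, abs_of_neg (by omega)]

-- ===== VERDICT (by name: the statement is the Claim_ definition above) =====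
set_option maxHeartbeats 1000000 in
theorem solution_spec : Claim_equal_solution := by
  intro e _
  unfold Spec_solution
  have htok : pvTokB e = pvTokA e := rfl
  simp only [solution, solution_alt, htok]
  set t := pvTokA e with ht
  have hl : t.1.length = t.2.length + 1 := pvTok_len e
  rw [show PySem.List.permutations ['*','+','-'] 3 = pvOrders from by decide]
  rw [PySem.List.foldl_append_singleton_eq_map (fun p => pvCalc t.1 t.2 p) pvOrders []]
  have hfe : ∀ p, List.foldl (fun st op => pvCalcWhile op st.1 st.2) (t.1, t.2) p
      = List.foldl (fun st op => pvPass op st.1 st.2) (t.1, t.2) p :=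
    fun p => pvFold_eq p (t.1, t.2) hl
  simp only [pvOrders, List.map_cons, List.map_nil, List.nil_append]
  rw [PySem.List.max?_id_cons]
  simp only [Option.getD_some, pvCalc, hfe]
  simp only [List.foldl_cons, List.foldl_nil]
  simp only [pv_if_abs]
  simp only [pv_if_gt_max]
  simp only [pv_max_zero_abs]
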